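-- pv_equiv track=rewrite | github.com/ingridportilho/Calculo_Numerico | bisseccao_newton.py | calc_k
-- ===== SOURCE A (Python) =====
-- def calc_k(px):
--   indice = len(px) - 1
--   k = 0
--   for i in px:
--     if(px[indice] < 0):
--         k = indice
--         break
--     indice = indice - 1
--   return k
-- ===== SOURCE B (Python) =====
-- def calc_k(px):
--     k = 0
--     for i, v in enumerate(px):
--         if v < 0:
--             k = i
--     return k
-- ===== Notes on version B (the rewrite author's own statement) =====
-- stated objective: simpler
-- what changed: Replaces the backward scan with a decrementing index and an early break by a forward enumerate pass that keeps the last negative index seen.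
import Mathlib
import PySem

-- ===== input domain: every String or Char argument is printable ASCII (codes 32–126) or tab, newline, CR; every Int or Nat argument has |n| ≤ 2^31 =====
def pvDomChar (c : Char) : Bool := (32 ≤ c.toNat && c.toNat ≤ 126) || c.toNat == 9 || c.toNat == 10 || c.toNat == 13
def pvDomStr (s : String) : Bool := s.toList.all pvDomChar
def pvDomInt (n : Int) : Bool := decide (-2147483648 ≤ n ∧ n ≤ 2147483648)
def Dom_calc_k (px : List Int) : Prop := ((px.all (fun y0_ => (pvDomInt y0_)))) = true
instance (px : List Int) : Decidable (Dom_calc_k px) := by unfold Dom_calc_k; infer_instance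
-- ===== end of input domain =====

-- ===== PORT A =====
-- B is a forward single pass keeping the last negative index; A scans from the top and breaks at the first negative. Objective: simpler.

-- the Python 'for i in px' loop body; fuel = remaining iterations of the for loop
def calcKLoop (px fuel : List Int) (indice k : Int) : Int :=
  match fuel with
  | [] => k
  | _ :: rest =>
    match PySem.List.pyGet? px indice with
    | some v => if v < 0 then indice else calcKLoop px rest (indice - 1) k
    | none => k  -- unreachable: indice stays within range while fuel lasts

def calc_k (px : List Int) : Int :=
  calcKLoop px px ((px.length : Int) - 1) 0

-- ===== PORT B =====
def calc_k_alt (px : List Int) : Int :=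
  (PySem.List.enumerate px).foldl (fun k iv => if iv.2 < 0 then iv.1 else k) 0

-- ===== PRECONDITION & SPEC =====
def Spec_calc_k (px : List Int) (out : Int) : Prop := out = calc_k_alt px
instance (px : List Int) (out : Int) : Decidable (Spec_calc_k px out) := by unfold Spec_calc_k; infer_instance

-- ===== CLAIM =====
def Claim_equal_calc_k : Prop := ∀ (px : List Int), Dom_calc_k px → Spec_calc_k px (calc_k px)

-- ===== LEMMAS AND PROOFS =====

-- the loop depends on fuel only through its length
theorem calcKLoop_fuel (px : List Int) : ∀ (f1 f2 : List Int), f1.length = f2.length →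
    ∀ (i k : Int), calcKLoop px f1 i k = calcKLoop px f2 i k := by
  intro f1
  induction f1 with
  | nil => intro f2 h i k; cases f2 with
    | nil => rfl
    | cons b t => simp at h
  | cons a t ih =>
    intro f2 h i k
    cases f2 with
    | nil => simp at h
    | cons b t2 =>
      simp only [List.length_cons, Nat.add_right_cancel_iff] at h
      simp only [calcKLoop]
      cases PySem.List.pyGet? px i with
      | none => rfl
      | some v =>
        by_cases hv : v < 0
        · simp [hv]
        · simp [hv, ih t2 h]

-- appending an element does not change the loop when indices stay inside the prefix
theorem calcKLoop_prefix (ys : List Int) (x : Int) :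
    ∀ (fuel : List Int) (i k : Int), (fuel.length : Int) ≤ i + 1 → i < (ys.length : Int) →
    calcKLoop (ys ++ [x]) fuel i k = calcKLoop ys fuel i k := by
  intro fuel
  induction fuel with
  | nil => intro i k _ _; rfl
  | cons a t ih =>
    intro i k hlen hi
    have h0 : 0 ≤ i := by
      simp only [List.length_cons] at hlen; push_cast at hlen; omega
    have hget : PySem.List.pyGet? (ys ++ [x]) i = PySem.List.pyGet? ys i := by
      rw [PySem.List.pyGet?_of_nonneg _ h0, PySem.List.pyGet?_of_nonneg _ h0]
      have : i.toNat < ys.length := by omega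
      rw [List.getElem?_append_left this]
    simp only [calcKLoop, hget]
    cases PySem.List.pyGet? ys i with
    | none => rfl
    | some v =>
      by_cases hv : v < 0
      · simp [hv]
      · have : (t.length : Int) ≤ (i - 1) + 1 := by
          simp only [List.length_cons] at hlen; push_cast at hlen; omega
        simp [hv, ih (i - 1) k this (by omega)]

theorem calc_k_alt_append (ys : List Int) (x : Int) :
    calc_k_alt (ys ++ [x]) = if x < 0 then (ys.length : Int) else calc_k_alt ys := by
  simp only [calc_k_alt, PySem.List.enumerate_append, List.foldl_append]
  simp [PySem.List.enumerate]

theorem calc_k_eq_alt (px : List Int) : calc_k px = calc_k_alt px := by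
  induction px using List.reverseRecOn with
  | nil => rfl
  | append_singleton ys x ih =>
    rw [calc_k_alt_append]
    simp only [calc_k]
    have hget : PySem.List.pyGet? (ys ++ [x]) (((ys ++ [x]).length : Int) - 1)
        = some x := by
      simp only [List.length_append, List.length_singleton]
      push_cast
      have : ((ys.length : Int) + 1) - 1 = (ys.length : Int) := by ring
      rw [this]
      exact PySem.List.pyGet?_append_length ys [] x
    rw [calcKLoop_fuel (ys ++ [x]) (ys ++ [x]) (x :: ys) (by simp)]
    simp only [calcKLoop, hget]
    have hlen1 : ((ys ++ [x]).length : Int) - 1 = (ys.length : Int) := by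
      simp
    by_cases hx : x < 0
    · simp [hx]
    · simp only [hx, if_false, hlen1]
      cases ys with
      | nil => simp [calcKLoop, calc_k_alt, PySem.List.enumerate]
      | cons b bs =>
        rw [calcKLoop_prefix (b :: bs) x (b :: bs) _ _ (by omega)
          (by omega)]
        exact ih

-- ===== VERDICT =====
theorem calc_k_spec : Claim_equal_calc_k := by
  intro px _
  exact calc_k_eq_alt px
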